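-- pv_equiv track=rewrite | github.com/khatvangi/protein-semantic-collapse | scripts/strengthen_hypothesis.py | find_consecutive_de_segments
-- ===== SOURCE A (Python) =====
-- def find_consecutive_de_segments(sequence, min_length=3):
--     """
--     Find segments of >=min_length CONSECUTIVE D/E residues.
--
--     This is the literature standard (Wang et al. 2025: "≥10 consecutive D/E").
--     We use min_length=3 as a more inclusive threshold.
--
--     Returns list of (start, end, length) tuples (0-indexed, exclusive end).
--     """
--     segments = []
--     i = 0
--     while i < len(sequence):
--         if sequence[i] in 'DE':
--             start = i
--             while i < len(sequence) and sequence[i] in 'DE':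
--                 i += 1
--             length = i - start
--             if length >= min_length:
--                 segments.append((start, i, length))
--         else:
--             i += 1
--     return segments
-- ===== SOURCE B (Python) =====
-- def find_consecutive_de_segments(sequence, min_length=3):
--     """Boundary detection in staged passes: mark run starts (a D/E whose
--     predecessor is not D/E) and run ends (a D/E whose successor is not D/E),
--     zip them into (start, end) pairs, and keep the long-enough ones."""
--     n = len(sequence)
--     de = [c in 'DE' for c in sequence]
--     starts = [i for i in range(n) if de[i] and (i == 0 or not de[i - 1])]
--     ends = [i + 1 for i in range(n) if de[i] and (i == n - 1 or not de[i + 1])]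
--     return [(a, b, b - a) for a, b in zip(starts, ends) if b - a >= min_length]
-- ===== Notes on version B (the rewrite author's own statement) =====
-- stated objective: alternative
-- what changed: Replaces A's single stateful scan with nested run-consuming while loops by staged boundary detection: comprehensions mark run starts (D/E with non-D/E predecessor) and run ends (D/E with non-D/E successor), the two index lists are zipped into (start,end) pairs and filtered by length.
import Mathlib
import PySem

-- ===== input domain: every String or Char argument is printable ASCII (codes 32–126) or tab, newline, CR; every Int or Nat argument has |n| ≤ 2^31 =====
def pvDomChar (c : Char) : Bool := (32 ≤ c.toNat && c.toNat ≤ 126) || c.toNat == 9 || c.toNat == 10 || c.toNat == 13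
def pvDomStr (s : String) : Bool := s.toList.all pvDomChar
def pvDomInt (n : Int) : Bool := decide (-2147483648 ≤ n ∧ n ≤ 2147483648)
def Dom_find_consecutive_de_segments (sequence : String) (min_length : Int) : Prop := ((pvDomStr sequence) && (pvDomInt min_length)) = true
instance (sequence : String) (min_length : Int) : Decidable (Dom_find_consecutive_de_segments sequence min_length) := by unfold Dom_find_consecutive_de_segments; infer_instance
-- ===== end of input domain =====

-- B replaces A's stateful scan by staged boundary-detection passes (starts, ends, zip); same cost, different decomposition.

-- `c in 'DE'` (exact: membership in the two-character string)
def pvIsDE (c : Char) : Bool := c == 'D' || c == 'E'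

-- ===== PORT A =====
-- inner `while i < len(sequence) and sequence[i] in 'DE': i += 1`,
-- consuming the remaining characters while counting i up
def pvTakeDE : List Char → Nat → Nat × List Char
  | [], i => (i, [])
  | c :: rest, i => if pvIsDE c then pvTakeDE rest (i + 1) else (i, c :: rest)

theorem pvTakeDE_len : ∀ (l : List Char) (i : Nat), (pvTakeDE l i).2.length ≤ l.length := by
  intro l
  induction l with
  | nil => intro i; simp [pvTakeDE]
  | cons c rest ih =>
    intro i
    by_cases h : pvIsDE c = true
    · simpa [pvTakeDE, h] using Nat.le_succ_of_le (ih (i + 1))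
    · simp [pvTakeDE, h]

-- outer `while i < len(sequence)` loop of A (the first iteration of the inner
-- while, consuming sequence[i] itself, is inlined: takeDE continues from i+1)
def pvLoopA (m : Int) : List Char → Nat → List (Int × Int × Int)
  | [], _ => []
  | c :: rest, i =>
    if pvIsDE c then
      let r := pvTakeDE rest (i + 1)
      let len : Int := (r.1 : Int) - (i : Int)
      (if m ≤ len then [((i : Int), (r.1 : Int), len)] else []) ++ pvLoopA m r.2 r.1
    else
      pvLoopA m rest (i + 1)
  termination_by l => l.length
  decreasing_by
  · exact Nat.lt_succ_of_le (pvTakeDE_len rest (i + 1))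
  · simp

def find_consecutive_de_segments (sequence : String) (min_length : Int) : List (Int × Int × Int) :=
  pvLoopA min_length sequence.toList 0

-- ===== PORT B =====
-- Source B: de = [c in 'DE' for c in sequence];
-- starts = [i for i in range(n) if de[i] and (i == 0 or not de[i-1])]
-- ends   = [i+1 for i in range(n) if de[i] and (i == n-1 or not de[i+1])]
-- return [(a, b, b-a) for a, b in zip(starts, ends) if b - a >= min_length]
-- (the guarded de[i-1] / de[i+1] lookups are never out of range thanks to the
-- short-circuit `or`; getD with default false is exact on the guarded branch)
def find_consecutive_de_segments_alt (sequence : String) (min_length : Int) : List (Int × Int × Int) :=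
  let l := sequence.toList
  let n := l.length
  let de := l.map pvIsDE
  let starts := (List.range n).filter (fun i => de.getD i false && (decide (i = 0) || !(de.getD (i - 1) false)))
  let ends : List Nat := ((List.range n).filter (fun i => de.getD i false && (decide (i = n - 1) || !(de.getD (i + 1) false)))).map (· + 1)
  (starts.zip ends).filterMap (fun p =>
    if min_length ≤ (p.2 : Int) - (p.1 : Int) then some ((p.1 : Int), (p.2 : Int), (p.2 : Int) - (p.1 : Int)) else none)

-- ===== PRECONDITION & SPEC =====
def Spec_find_consecutive_de_segments (sequence : String) (min_length : Int) (out : List (Int × Int × Int)) : Prop := out = find_consecutive_de_segments_alt sequence min_length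
instance (sequence : String) (min_length : Int) (out : List (Int × Int × Int)) : Decidable (Spec_find_consecutive_de_segments sequence min_length out) := by unfold Spec_find_consecutive_de_segments; infer_instance

-- ===== CLAIM (what is proved, stated in full; the proofs are below) =====
def Claim_equal_find_consecutive_de_segments : Prop := ∀ (sequence : String) (min_length : Int), Dom_find_consecutive_de_segments sequence min_length → Spec_find_consecutive_de_segments sequence min_length (find_consecutive_de_segments sequence min_length)

-- ===== LEMMAS AND PROOFS =====

-- start indices of B with an explicit "previous char is D/E" flag for index 0
def pvG (de : List Bool) (prev : Bool) : List Nat :=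
  (List.range de.length).filter (fun i => de.getD i false && !(if i = 0 then prev else de.getD (i - 1) false))

-- end indices of B in simplified form (at i = n-1 the getD default false makes the clause true)
def pvE (de : List Bool) : List Nat :=
  (List.range de.length).filter (fun i => de.getD i false && !(de.getD (i + 1) false))

def pvPairs (de : List Bool) : List (Nat × Nat) := (pvG de false).zip ((pvE de).map (· + 1))

def pvF (m : Int) (i : Nat) (p : Nat × Nat) : Option (Int × Int × Int) :=
  if m ≤ (p.2 : Int) - (p.1 : Int) then some ((p.1 : Int) + i, (p.2 : Int) + i, (p.2 : Int) - (p.1 : Int)) else none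

theorem starts_eq (de : List Bool) :
    (List.range de.length).filter (fun i => de.getD i false && (decide (i = 0) || !(de.getD (i - 1) false))) = pvG de false := by
  unfold pvG
  apply List.filter_congr
  intro i _
  cases i with
  | zero => simp
  | succ k => simp

theorem ends_eq (de : List Bool) :
    (List.range de.length).filter (fun i => de.getD i false && (decide (i = de.length - 1) || !(de.getD (i + 1) false))) = pvE de := by
  unfold pvE
  apply List.filter_congr
  intro i hi
  have hilt : i < de.length := List.mem_range.mp hi
  by_cases h : i = de.length - 1
  · have hlen : de.length ≤ i + 1 := by omega
    rw [List.getD_eq_default _ _ hlen]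
    simp [h]
  · simp [h]

theorem G_cons (b : Bool) (t : List Bool) (prev : Bool) :
    pvG (b :: t) prev = (if b && !prev then [0] else []) ++ (pvG t b).map (· + 1) := by
  unfold pvG
  rw [List.length_cons, List.range_succ_eq_map, List.filter_cons, List.filter_map]
  have h0 : ((b :: t).getD 0 false && !(if 0 = 0 then prev else (b :: t).getD (0 - 1) false)) = (b && !prev) := by simp
  rw [h0]
  have hrest : (List.range t.length).filter
      ((fun i => (b :: t).getD i false && !(if i = 0 then prev else (b :: t).getD (i - 1) false)) ∘ Nat.succ)
      = (List.range t.length).filter (fun i => t.getD i false && !(if i = 0 then b else t.getD (i - 1) false)) := by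
    apply List.filter_congr
    intro i _
    cases i with
    | zero => simp
    | succ k => simp
  rw [hrest]
  split_ifs with h <;> simp

theorem E_cons (b : Bool) (t : List Bool) :
    pvE (b :: t) = (if b && !(t.getD 0 false) then [0] else []) ++ (pvE t).map (· + 1) := by
  unfold pvE
  rw [List.length_cons, List.range_succ_eq_map, List.filter_cons, List.filter_map]
  have h0 : ((b :: t).getD 0 false && !((b :: t).getD (0 + 1) false)) = (b && !(t.getD 0 false)) := by simp
  rw [h0]
  have hrest : (List.range t.length).filter
      ((fun i => (b :: t).getD i false && !((b :: t).getD (i + 1) false)) ∘ Nat.succ)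
      = (List.range t.length).filter (fun i => t.getD i false && !(t.getD (i + 1) false)) := by
    apply List.filter_congr
    intro i _
    simp
  rw [hrest]
  split_ifs with h <;> simp

theorem G_head_false (rest : List Bool) (h : rest.getD 0 false = false) :
    pvG rest true = pvG rest false := by
  cases rest with
  | nil => simp [pvG]
  | cons b t =>
    have hb : b = false := by simpa using h
    subst hb
    rw [G_cons, G_cons]
    simp

theorem G_run (rest : List Bool) (h : rest.getD 0 false = false) :
    ∀ k : Nat, pvG (List.replicate k true ++ rest) true = (pvG rest false).map (· + k) := by
  intro k
  induction k with
  | zero => simp [G_head_false rest h]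
  | succ k ih =>
    rw [List.replicate_succ, List.cons_append, G_cons, ih]
    simp only [Bool.not_true, Bool.and_false, Bool.false_eq_true, if_false, List.nil_append,
      List.map_map]
    apply List.map_congr_left
    intro a _
    simp [Function.comp]
    omega

theorem E_run (rest : List Bool) (h : rest.getD 0 false = false) :
    ∀ k : Nat, pvE (List.replicate (k + 1) true ++ rest) = k :: (pvE rest).map (· + (k + 1)) := by
  intro k
  induction k with
  | zero =>
    have h1 : List.replicate (0 + 1) true ++ rest = true :: rest := by simp
    rw [h1, E_cons, h]
    simp
  | succ k ih =>
    have h2 : List.replicate (k + 1 + 1) true ++ rest = true :: (List.replicate (k + 1) true ++ rest) := by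
      simp [List.replicate_succ]
    rw [h2, E_cons, ih]
    have hhd : ((List.replicate (k + 1) true ++ rest).getD 0 false) = true := by
      simp [List.replicate_succ]
    rw [hhd]
    simp only [Bool.not_true, Bool.and_false, Bool.false_eq_true, if_false, List.nil_append,
      List.map_cons, List.map_map]
    congr 1

theorem zip_map_shift (a b : List Nat) (s : Nat) :
    (a.map (· + s)).zip (b.map (· + s)) = (a.zip b).map (fun p => (p.1 + s, p.2 + s)) := by
  rw [List.zip_map]
  apply List.map_congr_left
  intro p _
  rfl

theorem pairs_false (t : List Bool) :
    pvPairs (false :: t) = (pvPairs t).map (fun p => (p.1 + 1, p.2 + 1)) := by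
  unfold pvPairs
  rw [G_cons, E_cons]
  simp only [Bool.false_and, Bool.false_eq_true, if_false, List.nil_append]
  rw [zip_map_shift]

theorem pairs_run (rest : List Bool) (k : Nat) (h : rest.getD 0 false = false) :
    pvPairs (List.replicate (k + 1) true ++ rest)
      = (0, k + 1) :: (pvPairs rest).map (fun p => (p.1 + (k + 1), p.2 + (k + 1))) := by
  unfold pvPairs
  have hg : pvG (List.replicate (k + 1) true ++ rest) false = 0 :: (pvG rest false).map (· + (k + 1)) := by
    have h2 : List.replicate (k + 1) true ++ rest = true :: (List.replicate k true ++ rest) := by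
      simp [List.replicate_succ]
    rw [h2, G_cons, G_run rest h k]
    simp only [Bool.not_false, Bool.and_true, List.map_map]
    congr 1
  rw [hg, E_run rest h k, List.map_cons, List.map_map]
  have he : (pvE rest).map ((· + 1) ∘ (· + (k + 1))) = ((pvE rest).map (· + 1)).map (· + (k + 1)) := by
    rw [List.map_map]
    apply List.map_congr_left
    intro a _
    simp only [Function.comp_apply]
    omega
  rw [he, List.zip_cons_cons, zip_map_shift]

theorem filterMap_shift (m : Int) (i s : Nat) (P : List (Nat × Nat)) :
    (P.map (fun p => (p.1 + s, p.2 + s))).filterMap (pvF m i) = P.filterMap (pvF m (i + s)) := by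
  rw [List.filterMap_map]
  apply List.filterMap_congr
  intro p _
  show pvF m i (p.1 + s, p.2 + s) = pvF m (i + s) p
  unfold pvF
  have hd : ((p.2 + s : Nat) : Int) - ((p.1 + s : Nat) : Int) = (p.2 : Int) - (p.1 : Int) := by
    push_cast; ring
  rw [hd]
  split_ifs with hm
  · refine congrArg some ?_
    refine Prod.ext ?_ (Prod.ext ?_ rfl) <;> push_cast <;> ring
  · rfl

theorem dropWhile_head_false : ∀ (l : List Char), ((l.dropWhile pvIsDE).map pvIsDE).getD 0 false = false := by
  intro l
  induction l with
  | nil => simp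
  | cons c t ih =>
    by_cases h : pvIsDE c = true
    · simpa [List.dropWhile_cons, h] using ih
    · simp only [List.dropWhile_cons]
      rw [if_neg (by simp [h])]
      simpa using h

theorem map_decomp (rest : List Char) :
    rest.map pvIsDE = List.replicate (rest.takeWhile pvIsDE).length true ++ ((rest.dropWhile pvIsDE).map pvIsDE) := by
  conv_lhs => rw [← List.takeWhile_append_dropWhile (p := pvIsDE) (l := rest)]
  rw [List.map_append]
  congr 1
  apply List.eq_replicate_iff.mpr
  constructor
  · simp
  · intro b hb
    rcases List.mem_map.mp hb with ⟨x, hx, hbx⟩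
    rw [← hbx]
    exact List.mem_takeWhile_imp hx

-- closed form of pvTakeDE (used by main_inv)
theorem pvTakeDE_eq (l : List Char) : ∀ i : Nat,
    pvTakeDE l i = (i + (l.takeWhile pvIsDE).length, l.dropWhile pvIsDE) := by
  induction l with
  | nil => intro i; simp [pvTakeDE]
  | cons c rest ih =>
    intro i
    by_cases h : pvIsDE c = true
    · simp [pvTakeDE, h, ih (i + 1)]
      omega
    · simp [pvTakeDE, h]

theorem main_inv (m : Int) : ∀ (n : Nat) (l : List Char), l.length ≤ n → ∀ i : Nat,
    pvLoopA m l i = (pvPairs (l.map pvIsDE)).filterMap (pvF m i) := by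
  intro n
  induction n with
  | zero =>
    intro l hl i
    have : l = [] := List.eq_nil_of_length_eq_zero (Nat.le_zero.mp hl)
    subst this
    simp [pvLoopA, pvPairs, pvG]
  | succ n ih =>
    intro l hl i
    match l with
    | [] => simp [pvLoopA, pvPairs, pvG]
    | c :: rest =>
      have hrest : rest.length ≤ n := by simpa using hl
      by_cases hk : pvIsDE c = true
      · -- D/E head: the whole run replicate (k+1) true
        rw [pvLoopA, if_pos hk]
        set k := (rest.takeWhile pvIsDE).length with hkdef
        have hmap : (c :: rest).map pvIsDE
            = List.replicate (k + 1) true ++ ((rest.dropWhile pvIsDE).map pvIsDE) := by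
          rw [List.map_cons, hk, map_decomp rest, List.replicate_succ, List.cons_append]
        rw [hmap, pairs_run _ _ (dropWhile_head_false rest), List.filterMap_cons,
          filterMap_shift]
        have hr : pvTakeDE rest (i + 1) = (i + 1 + k, rest.dropWhile pvIsDE) := by
          rw [pvTakeDE_eq]
        rw [hr]
        simp only []
        have htail : pvLoopA m (rest.dropWhile pvIsDE) (i + 1 + k)
            = ((pvPairs ((rest.dropWhile pvIsDE).map pvIsDE)).filterMap (pvF m (i + (k + 1)))) := by
          have : i + (k + 1) = i + 1 + k := by omega
          rw [this]
          exact ih _ (le_trans (List.length_dropWhile_le _ _) hrest) _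
        rw [htail]
        have hcond : (m ≤ ((i + 1 + k : Nat) : Int) - ((i : Nat) : Int)) ↔ (m ≤ ((k + 1 : Nat) : Int) - ((0 : Nat) : Int)) := by
          push_cast; omega
        unfold pvF
        simp only []
        by_cases hm : m ≤ ((i + 1 + k : Nat) : Int) - ((i : Nat) : Int)
        · rw [if_pos hm, if_pos (by exact_mod_cast (by push_cast at hm ⊢; omega : m ≤ ((k+1 : Nat) : Int) - ((0:Nat) : Int)))]
          simp only [List.singleton_append]
          congr 1
          refine Prod.ext ?_ (Prod.ext ?_ ?_) <;> push_cast <;> ring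
        · rw [if_neg hm, if_neg (by push_cast at hm ⊢; omega)]
          simp
      · have hk' : pvIsDE c = false := by simpa using hk
        rw [pvLoopA, if_neg hk]
        have hmap : (c :: rest).map pvIsDE = false :: rest.map pvIsDE := by
          rw [List.map_cons, hk']
        rw [hmap, pairs_false, filterMap_shift]
        exact ih rest hrest (i + 1)

-- ===== VERDICT (by name: the statement is the Claim_ definition above) =====
theorem find_consecutive_de_segments_spec : Claim_equal_find_consecutive_de_segments := by
  intro sequence min_length _
  unfold Spec_find_consecutive_de_segments find_consecutive_de_segments find_consecutive_de_segments_alt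
  simp only []
  have hlen : sequence.toList.length = (sequence.toList.map pvIsDE).length := by simp
  rw [hlen, starts_eq, ends_eq]
  rw [main_inv min_length sequence.toList.length sequence.toList le_rfl 0]
  apply List.filterMap_congr
  intro p _
  unfold pvF
  split_ifs with h
  · simp
  · rfl
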